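-- pv_equiv track=rewrite | github.com/atetz/aoc24 | src/day9/day9.py | get_empty_sectors
-- ===== SOURCE A (Python) =====
-- from collections import defaultdict
-- from typing import Dict, List
--
-- def get_empty_sectors(fragmented_disk: List[str]) -> Dict[int, int]:
--     empty_sectors = defaultdict(int)  # position, size
--     start_index = None
--
--     for id, fragment in enumerate(fragmented_disk):
--         if fragment == ".":
--             if start_index is None:
--                 start_index = id
--                 empty_sectors[start_index] = 1
--             else:
--                 empty_sectors[start_index] += 1
--         else:
--             start_index = None
--     return empty_sectors
-- ===== SOURCE B (Python) =====
-- from collections import defaultdict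
--
--
-- def get_empty_sectors(fragmented_disk):
--     # set-membership formulation: a '.' position starts a run iff its predecessor
--     # position is not a '.', and ends one iff its successor is not; zip them up.
--     dots = {i for i, f in enumerate(fragmented_disk) if f == "."}
--     starts = sorted(d for d in dots if d - 1 not in dots)
--     ends = sorted(d for d in dots if d + 1 not in dots)
--     empty_sectors = defaultdict(int)
--     for s, e in zip(starts, ends):
--         empty_sectors[s] = e - s + 1
--     return empty_sectors
-- ===== Notes on version B (the rewrite author's own statement) =====
-- stated objective: alternative
-- what changed: Replaced A's sequential state machine (start_index sentinel, defaultdict increment per '.' cell) by the set-membership formulation of consecutive runs: build the set of '.' positions, select run starts (predecessor not in the set) and run ends (successor not in the set) independently, sort each, and zip them into (start, end-start+1) entries.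
import Mathlib
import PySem

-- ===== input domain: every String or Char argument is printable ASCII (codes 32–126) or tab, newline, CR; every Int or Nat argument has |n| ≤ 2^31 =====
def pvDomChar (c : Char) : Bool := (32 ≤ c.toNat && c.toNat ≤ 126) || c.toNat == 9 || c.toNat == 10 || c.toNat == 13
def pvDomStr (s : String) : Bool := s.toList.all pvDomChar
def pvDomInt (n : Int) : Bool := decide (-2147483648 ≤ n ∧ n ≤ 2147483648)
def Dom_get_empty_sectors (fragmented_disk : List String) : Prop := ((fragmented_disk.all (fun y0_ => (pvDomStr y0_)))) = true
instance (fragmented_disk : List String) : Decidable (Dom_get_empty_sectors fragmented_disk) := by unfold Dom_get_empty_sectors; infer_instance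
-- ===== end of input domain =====

-- B replaces A's sequential state machine by the set-membership formulation of
-- consecutive runs (starts = dots whose predecessor is no dot, ends likewise),
-- sorted and zipped (objective: alternative).

-- ===== PORT A =====
-- loop body of A: state = (empty_sectors, start_index), element = (id, fragment)
def aStep (st : PySem.Dict Int Int × Option Int) (p : Int × String) :
    PySem.Dict Int Int × Option Int :=
  if p.2 == "." then
    match st.2 with
    | none => (st.1.insert p.1 1, some p.1)
    | some s => (st.1.modify s 0 (· + 1), some s)
  else (st.1, none)

def get_empty_sectors (fragmented_disk : List String) : List (Int × Int) :=
  ((PySem.List.enumerate fragmented_disk 0).foldl aStep (PySem.Dict.empty, none)).1.items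

-- ===== PORT B =====
-- 'sorted(d for d in dots if …)' iterates the set, but sorted with the identity key
-- makes the result independent of the set's iteration order, so the port filters the
-- Set's element list and sorts it (exact).
def get_empty_sectors_alt (fragmented_disk : List String) : List (Int × Int) :=
  let dots : PySem.Set Int :=
    PySem.Set.ofList (((PySem.List.enumerate fragmented_disk 0).filter (fun p => p.2 == ".")).map Prod.fst)
  let starts := PySem.List.sorted (dots.filter (fun d => !(PySem.Set.contains dots (d - 1)))) (fun x => x) false
  let ends := PySem.List.sorted (dots.filter (fun d => !(PySem.Set.contains dots (d + 1)))) (fun x => x) false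
  ((starts.zip ends).foldl (fun d p => d.insert p.1 (p.2 - p.1 + 1)) PySem.Dict.empty).items

-- ===== PRECONDITION & SPEC =====
def Spec_get_empty_sectors (fragmented_disk : List String) (out : List (Int × Int)) : Prop := out = get_empty_sectors_alt fragmented_disk
instance (fragmented_disk : List String) (out : List (Int × Int)) : Decidable (Spec_get_empty_sectors fragmented_disk out) := by unfold Spec_get_empty_sectors; infer_instance

-- ===== CLAIM (what is proved, stated in full; the proofs are below) =====
def Claim_equal_get_empty_sectors : Prop := ∀ (fragmented_disk : List String), Dom_get_empty_sectors fragmented_disk → Spec_get_empty_sectors fragmented_disk (get_empty_sectors fragmented_disk)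

-- ===== LEMMAS AND PROOFS =====

-- run decomposition of the disk: the common reference point of both proofs
def altGo (pos : Int) : List String → List (Int × Int)
  | [] => []
  | s :: rest =>
    let size : Int := 1 + ((rest.takeWhile (fun t => t == s)).length : Int)
    (if s == "." then [(pos, size)] else []) ++
      altGo (pos + size) (rest.dropWhile (fun t => t == s))
termination_by l => l.length
decreasing_by
  exact Nat.lt_succ_of_le (List.length_dropWhile_le _ _)

lemma altGo_cons_ne (i : Int) (x : String) (rest : List String) (hx : x ≠ ".") :
    altGo i (x :: rest) = altGo (i + 1) rest := by
  match rest with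
  | [] => simp [altGo, hx]
  | t :: rest2 =>
    by_cases ht : t = x
    · subst ht
      rw [altGo, altGo]
      simp [hx]
      ring_nf
    · rw [altGo]
      simp [hx, ht]

-- ---- A-side: the fold computes altGo ----
lemma fold_run (l : List String) :
    (∀ (i : Int) (d : PySem.Dict Int Int), d.keys.Nodup → (∀ k ∈ d.keys, k < i) →
      ((PySem.List.enumerate l i).foldl aStep (d, none)).1.items = d.items ++ altGo i l)
    ∧
    (∀ (i : Int) (d0 : List (Int × Int)) (s c : Int),
      (d0.map Prod.fst ++ [s]).Nodup → (∀ k ∈ d0.map Prod.fst ++ [s], k < i) →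
      ((PySem.List.enumerate l i).foldl aStep (PySem.Dict.mk (d0 ++ [(s, c)]), some s)).1.items
        = d0 ++ [(s, c + ((l.takeWhile (fun t => t == ".")).length : Int))]
            ++ altGo (i + ((l.takeWhile (fun t => t == ".")).length : Int))
                 (l.dropWhile (fun t => t == "."))) := by
  induction l with
  | nil =>
    constructor
    · intro i d _ _; simp [altGo, PySem.List.enumerate_nil]
    · intro i d0 s c _ _; simp [altGo, PySem.List.enumerate_nil]
  | cons x rest ih =>
    constructor
    · intro i d hnd hk
      rw [PySem.List.enumerate_cons, List.foldl_cons]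
      by_cases hx : x = "."
      · subst hx
        have hni : i ∉ d.keys := fun h => absurd (hk i h) (lt_irrefl i)
        have hcon : d.contains i = false := by
          rw [Bool.eq_false_iff]
          intro h
          exact hni ((PySem.Dict.contains_iff_mem_keys d i).mp h)
        have hins : d.insert i 1 = PySem.Dict.mk (d.items ++ [(i, (1:Int))]) := by
          apply PySem.Dict.ext
          simp [PySem.Dict.items_insert_of_not_contains, hcon]
        have hstep : aStep (d, none) (i, ".") = (PySem.Dict.mk (d.items ++ [(i, (1:Int))]), some i) := by
          simp [aStep, hins]
        have hkd : d.keys = d.items.map Prod.fst := by simp [PySem.Dict.keys]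
        have h2 := ih.2 (i + 1) d.items i 1
          (by
            rw [List.nodup_append]
            refine ⟨hkd ▸ hnd, List.nodup_singleton i, ?_⟩
            intro a ha b hb
            rw [List.mem_singleton] at hb
            subst hb
            exact fun h => hni (h ▸ hkd ▸ ha))
          (by
            intro k hkm
            rcases List.mem_append.mp hkm with h | h
            · have : k ∈ d.keys := by simpa [PySem.Dict.keys] using h
              have := hk k this; omega
            · simp at h; omega)
        rw [hstep, h2, altGo]
        simp [List.append_assoc]
        ring_nf
      · have hstep : aStep (d, none) (i, x) = (d, none) := by
          simp [aStep, hx]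
        rw [hstep, ih.1 (i + 1) d hnd (fun k hkm => by have := hk k hkm; omega),
          altGo_cons_ne i x rest hx]
    · intro i d0 s c hnd hk
      have hsd0 : s ∉ d0.map Prod.fst := by
        have := List.nodup_append.mp hnd
        intro h
        exact this.2.2 s h s (List.mem_singleton_self s) rfl
      have hkeys : (PySem.Dict.mk (d0 ++ [(s, c)])).keys = d0.map Prod.fst ++ [s] := by
        simp [PySem.Dict.keys]
      rw [PySem.List.enumerate_cons, List.foldl_cons]
      by_cases hx : x = "."
      · subst hx
        have hgetD : (PySem.Dict.mk (d0 ++ [(s, c)])).getD s 0 = c := by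
          apply PySem.Dict.getD_of_mem_items
          · simp
          · rw [hkeys]; exact hnd
        have hconS : (PySem.Dict.mk (d0 ++ [(s, c)])).contains s = true := by
          rw [PySem.Dict.contains_iff_mem_keys, hkeys]; simp
        have hmod : (PySem.Dict.mk (d0 ++ [(s, c)])).modify s 0 (· + 1)
            = PySem.Dict.mk (d0 ++ [(s, c + 1)]) := by
          show (PySem.Dict.mk (d0 ++ [(s, c)])).insert s ((PySem.Dict.mk (d0 ++ [(s, c)])).getD s 0 + 1) = _
          rw [hgetD]
          apply PySem.Dict.ext
          rw [PySem.Dict.items_insert_of_contains _ _ hconS]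
          show (d0 ++ [(s, c)]).map _ = _
          rw [List.map_append]
          congr 1
          · rw [List.map_congr_left, List.map_id]
            intro p hp
            have : p.1 ≠ s := fun h => hsd0 (h ▸ List.mem_map_of_mem hp)
            simp [this]
          · simp
        have hstep : aStep (PySem.Dict.mk (d0 ++ [(s, c)]), some s) (i, ".")
            = (PySem.Dict.mk (d0 ++ [(s, c + 1)]), some s) := by
          simp [aStep, hmod]
        have h2 := ih.2 (i + 1) d0 s (c + 1) hnd
          (fun k hkm => by have := hk k hkm; omega)
        rw [hstep, h2]
        simp [List.takeWhile, List.dropWhile]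
        constructor
        · ring
        · congr 1; ring
      · have hstep : aStep (PySem.Dict.mk (d0 ++ [(s, c)]), some s) (i, x)
            = (PySem.Dict.mk (d0 ++ [(s, c)]), none) := by
          simp [aStep, hx]
        have h1 := ih.1 (i + 1) (PySem.Dict.mk (d0 ++ [(s, c)]))
          (by rw [hkeys]; exact hnd)
          (by rw [hkeys]; intro k hkm; have := hk k hkm; omega)
        rw [hstep, h1]
        have hx' : ¬ (x == ".") = true := by simp [hx]
        simp [hx', altGo_cons_ne i x rest hx]

-- ---- B-side helpers ----
-- the list of '.' positions, structurally
def dotsF (i : Int) : List String → List Int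
  | [] => []
  | x :: r => if x = "." then i :: dotsF (i + 1) r else dotsF (i + 1) r

-- group a list of integers into maximal consecutive runs, back to front
def groupC : List Int → List (Int × Int)
  | [] => []
  | d :: rest =>
    match groupC rest with
    | [] => [(d, 1)]
    | (s, n) :: t => if s = d + 1 then (d, n + 1) :: t else (d, 1) :: (s, n) :: t

lemma dotsF_eq (l : List String) : ∀ i : Int,
    ((PySem.List.enumerate l i).filter (fun p => p.2 == ".")).map Prod.fst = dotsF i l := by
  induction l with
  | nil => intro i; simp [dotsF, PySem.List.enumerate_nil]
  | cons x r ih =>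
    intro i
    rw [PySem.List.enumerate_cons]
    by_cases hx : x = "." <;> simp [dotsF, hx, ih]

lemma dotsF_lb (l : List String) : ∀ i : Int, ∀ d ∈ dotsF i l, i ≤ d := by
  induction l with
  | nil => intro i d hd; simp [dotsF] at hd
  | cons x r ih =>
    intro i d hd
    by_cases hx : x = "." <;> simp [dotsF, hx] at hd
    · rcases hd with h | h
      · omega
      · have := ih (i + 1) d h; omega
    · have := ih (i + 1) d hd; omega

lemma dotsF_pairwise (l : List String) : ∀ i : Int, (dotsF i l).Pairwise (· < ·) := by
  induction l with
  | nil => intro i; simp [dotsF]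
  | cons x r ih =>
    intro i
    by_cases hx : x = "." <;> simp [dotsF, hx]
    · exact ⟨fun d hd => by have := dotsF_lb r (i + 1) d hd; omega, ih (i + 1)⟩
    · exact ih (i + 1)

lemma groupC_cons_merge (d s n : Int) (t : List (Int × Int)) (r : List Int)
    (hgr : groupC r = (s, n) :: t) (hs : s = d + 1) : groupC (d :: r) = (d, n + 1) :: t := by
  rw [groupC, hgr]
  simp [hs]

lemma groupC_cons_new (d s n : Int) (t : List (Int × Int)) (r : List Int)
    (hgr : groupC r = (s, n) :: t) (hs : s ≠ d + 1) : groupC (d :: r) = (d, 1) :: groupC r := by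
  rw [groupC, hgr]
  simp [hs]

lemma groupC_cons (d : Int) (r : List Int) : ∃ n t, groupC (d :: r) = (d, n) :: t := by
  rw [groupC]
  rcases h : groupC r with _ | ⟨⟨s, n⟩, t⟩
  · exact ⟨1, [], rfl⟩
  · by_cases hs : s = d + 1
    · exact ⟨n + 1, t, by simp [hs]⟩
    · exact ⟨1, (s, n) :: t, by simp [hs]⟩

-- the zip of starts and ends computes groupC, on any strictly increasing list
lemma core (D : List Int) (h : D.Pairwise (· < ·)) :
    ((D.filter (fun d => !(D.contains (d - 1)))).zip
      (D.filter (fun d => !(D.contains (d + 1))))).map (fun p => (p.1, p.2 - p.1 + 1))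
    = groupC D := by
  induction D with
  | nil => simp [groupC]
  | cons d rest ih =>
    have hd : ∀ x ∈ rest, d < x := fun x hx => List.rel_of_pairwise_cons h hx
    have hrest : rest.Pairwise (· < ·) := h.of_cons
    have hPd : (!(d :: rest).contains (d - 1)) = true := by
      simp only [Bool.not_eq_eq_eq_not, Bool.not_true, ← Bool.not_eq_true,
        List.contains_iff_mem, List.mem_cons]
      rintro (h1 | h1)
      · omega
      · have := hd _ h1; omega
    have hPcong : ∀ x ∈ rest, x ≠ d + 1 →
        (!(d :: rest).contains (x - 1)) = (!rest.contains (x - 1)) := by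
      intro x _ hx
      by_cases hm : x - 1 ∈ rest
      · simp [List.mem_cons, hm]
      · have hne : x - 1 ≠ d := by omega
        simp [List.mem_cons, hm, hne]
    have hQcong : ∀ x ∈ rest,
        (!(d :: rest).contains (x + 1)) = (!rest.contains (x + 1)) := by
      intro x hx
      have := hd _ hx
      by_cases hm : x + 1 ∈ rest
      · simp [List.mem_cons, hm]
      · have hne : x + 1 ≠ d := by omega
        simp [List.mem_cons, hm, hne]
    cases rest with
    | nil => simp [groupC]
    | cons e r2 =>
      have hde : d < e := hd e List.mem_cons_self
      have hr2 : ∀ x ∈ r2, e < x := fun x hx => List.rel_of_pairwise_cons hrest hx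
      have hQrest : List.filter (fun x => !(d :: e :: r2).contains (x + 1)) (e :: r2)
          = List.filter (fun x => !(e :: r2).contains (x + 1)) (e :: r2) :=
        List.filter_congr hQcong
      by_cases he : e = d + 1
      · -- the head run continues: d is glued onto the run starting at e
        have hPe : (!(e :: r2).contains (e - 1)) = true := by
          simp only [Bool.not_eq_eq_eq_not, Bool.not_true, ← Bool.not_eq_true,
            List.contains_iff_mem, List.mem_cons]
          rintro (h1 | h1)
          · omega
          · have := hr2 _ h1; omega
        have hPDe : (!(d :: e :: r2).contains (e - 1)) = false := by
          have hx : e - 1 = d := by omega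
          simp [hx]
        have hPr2 : List.filter (fun x => !(d :: e :: r2).contains (x - 1)) r2
            = List.filter (fun x => !(e :: r2).contains (x - 1)) r2 :=
          List.filter_congr (fun x hx =>
            hPcong x (List.mem_cons_of_mem e hx) (by have := hr2 _ hx; omega))
        have hQDd : (!(d :: e :: r2).contains (d + 1)) = false := by
          have hx : d + 1 = e := by omega
          simp [hx]
        -- starts of D = d :: S, ends of D = ends of rest
        have hstarts : List.filter (fun x => !(d :: e :: r2).contains (x - 1)) (d :: e :: r2)
            = d :: List.filter (fun x => !(e :: r2).contains (x - 1)) r2 := by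
          rw [List.filter_cons, if_pos hPd, List.filter_cons, if_neg (by rw [hPDe]; exact Bool.false_ne_true), hPr2]
        have hends : List.filter (fun x => !(d :: e :: r2).contains (x + 1)) (d :: e :: r2)
            = List.filter (fun x => !(e :: r2).contains (x + 1)) (e :: r2) := by
          rw [List.filter_cons, if_neg (by rw [hQDd]; exact Bool.false_ne_true), hQrest]
        rw [hstarts, hends]
        rw [List.filter_cons, if_pos hPe] at ih
        specialize ih hrest
        obtain ⟨n, t, hgr⟩ := groupC_cons e r2
        rw [hgr] at ih
        cases hE : List.filter (fun x => !(e :: r2).contains (x + 1)) (e :: r2) with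
        | nil => rw [hE] at ih; simp at ih
        | cons E0 E' =>
          rw [hE] at ih
          rw [List.zip_cons_cons, List.map_cons] at ih ⊢
          obtain ⟨hhead, htail⟩ := List.cons_eq_cons.mp ih
          have hE0 : E0 - e + 1 = n := by
            have := congrArg Prod.snd hhead; simpa using this
          rw [groupC_cons_merge d e n t _ hgr he, htail]
          have : E0 - d + 1 = n + 1 := by omega
          simp [this]
      · -- the head run is the singleton [d]
        have hQDd : (!(d :: e :: r2).contains (d + 1)) = true := by
          simp only [Bool.not_eq_eq_eq_not, Bool.not_true, ← Bool.not_eq_true,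
            List.contains_iff_mem, List.mem_cons]
          rintro (h1 | h1 | h1)
          · omega
          · omega
          · have := hr2 _ h1; omega
        have hPrest : List.filter (fun x => !(d :: e :: r2).contains (x - 1)) (e :: r2)
            = List.filter (fun x => !(e :: r2).contains (x - 1)) (e :: r2) :=
          List.filter_congr (fun x hx => hPcong x hx
            (by rcases List.mem_cons.mp hx with h1 | h1
                · omega
                · have := hr2 _ h1; omega))
        have hstarts : List.filter (fun x => !(d :: e :: r2).contains (x - 1)) (d :: e :: r2)
            = d :: List.filter (fun x => !(e :: r2).contains (x - 1)) (e :: r2) := by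
          rw [List.filter_cons, if_pos hPd, hPrest]
        have hends : List.filter (fun x => !(d :: e :: r2).contains (x + 1)) (d :: e :: r2)
            = d :: List.filter (fun x => !(e :: r2).contains (x + 1)) (e :: r2) := by
          rw [List.filter_cons, if_pos hQDd, hQrest]
        rw [hstarts, hends, List.zip_cons_cons, List.map_cons, ih hrest]
        obtain ⟨n, t, hgr⟩ := groupC_cons e r2
        rw [groupC_cons_new d e n t _ hgr he]
        simp

-- groupC of the dot positions is the run decomposition
lemma groupC_dotsF (l : List String) : ∀ i : Int, groupC (dotsF i l) = altGo i l := by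
  induction l with
  | nil => intro i; simp [dotsF, groupC, altGo]
  | cons x rest ih =>
    intro i
    by_cases hx : x = "."
    · subst hx
      cases rest with
      | nil => simp [dotsF, groupC, altGo]
      | cons y r2 =>
        by_cases hy : y = "."
        · subst hy
          have h1 : altGo (i + 1) ("." :: r2)
              = (i + 1, 1 + ((r2.takeWhile (fun t => t == ".")).length : Int))
                :: altGo ((i + 1) + (1 + ((r2.takeWhile (fun t => t == ".")).length : Int)))
                     (r2.dropWhile (fun t => t == ".")) := by
            rw [altGo]
            simp
          have hIH := (ih (i + 1)).trans h1
          have hd : dotsF (i + 1) ("." :: r2) = (i + 1) :: dotsF (i + 2) r2 := by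
            simp [dotsF]
            ring_nf
          rw [hd] at hIH
          have hdo : dotsF i ("." :: "." :: r2) = i :: (i + 1) :: dotsF (i + 2) r2 := by
            simp [dotsF]
            ring_nf
          rw [hdo, groupC, hIH]
          simp only [if_pos]
          rw [altGo]
          simp [List.takeWhile, List.dropWhile]
          constructor
          · ring
          · congr 1
            ring
        · have hd : dotsF i ("." :: y :: r2) = i :: dotsF (i + 2) r2 := by
            simp [dotsF, hy]
            ring_nf
          have hd2 : dotsF (i + 1) (y :: r2) = dotsF (i + 2) r2 := by
            simp [dotsF, hy]
            ring_nf
          have hAg : altGo i ("." :: y :: r2) = (i, 1) :: altGo (i + 1) (y :: r2) := by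
            rw [altGo]
            simp [hy]
          rw [hd, hAg, ← ih (i + 1), hd2]
          cases h : dotsF (i + 2) r2 with
          | nil => simp [groupC]
          | cons d0 Ds =>
            have hd0 : i + 2 ≤ d0 := dotsF_lb r2 (i + 2) d0 (h ▸ List.mem_cons_self)
            obtain ⟨n, t, hgr⟩ := groupC_cons d0 Ds
            rw [groupC, hgr]
            have : ¬ (d0 = i + 1) := by omega
            simp [this]
    · have hd : dotsF i (x :: rest) = dotsF (i + 1) rest := by simp [dotsF, hx]
      rw [hd, altGo_cons_ne i x rest hx]
      exact ih (i + 1)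

lemma zip_map_fst_sublist (l1 l2 : List Int) : ((l1.zip l2).map Prod.fst).Sublist l1 := by
  induction l1 generalizing l2 with
  | nil => simp
  | cons a t ih =>
    cases l2 with
    | nil => simp
    | cons b t2 => simpa using (ih t2).cons₂ a

-- ===== VERDICT (by name: the statement is the Claim_ definition above) =====
theorem get_empty_sectors_spec : Claim_equal_get_empty_sectors := by
  intro l _
  unfold Spec_get_empty_sectors get_empty_sectors get_empty_sectors_alt
  have hA := (fold_run l).1 0 PySem.Dict.empty (by simp [PySem.Dict.keys, PySem.Dict.empty])
    (by simp [PySem.Dict.keys, PySem.Dict.empty])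
  have hpw : (dotsF 0 l).Pairwise (· < ·) := dotsF_pairwise l 0
  have hnd : (dotsF 0 l).Nodup := hpw.nodup
  simp only [PySem.Set.contains_eq_listContains, dotsF_eq l 0,
    PySem.Set.ofList_eq_self_of_nodup _ hnd]
  have hS : PySem.List.sorted ((dotsF 0 l).filter (fun d => !((dotsF 0 l).contains (d - 1))))
      (fun x => x) false = (dotsF 0 l).filter (fun d => !((dotsF 0 l).contains (d - 1))) :=
    PySem.List.sorted_eq_of_perm_of_pairwise_lt _ _ _ (List.Perm.refl _) (hpw.filter _)
  have hE : PySem.List.sorted ((dotsF 0 l).filter (fun d => !((dotsF 0 l).contains (d + 1))))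
      (fun x => x) false = (dotsF 0 l).filter (fun d => !((dotsF 0 l).contains (d + 1))) :=
    PySem.List.sorted_eq_of_perm_of_pairwise_lt _ _ _ (List.Perm.refl _) (hpw.filter _)
  rw [hS, hE]
  rw [PySem.Dict.items_foldl_insert_fresh _ Prod.fst (fun p => p.2 - p.1 + 1) _
    (by intro a _; exact PySem.Dict.contains_empty _)
    ((zip_map_fst_sublist _ _).nodup ((hpw.filter _).nodup))]
  rw [hA, core _ hpw, groupC_dotsF l 0]
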